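-- pv_equiv track=rewrite | github.com/Oshalb/Code-Chef-Contests | July cook-off 2021/gcdmod.py | check_mod
-- ===== SOURCE A (Python) =====
-- def check_mod(x, y):
--     if max(x, y) % min(y, x) == 0:
--         return 0
--     else:
--         c = float('inf')
--         for i in range(2):
--             z = x
--             b = y
--             f = 0
--             while max(z, b) % min(z, b) != 0:
--                 if i == 0:
--                     z += 1
--                     f += 1
--                 elif i == 1:
--                     b += 1
--                     f += 1
--             if f < c:
--                 c = f
--         return c
-- ===== SOURCE B (Python) =====
-- def divisors(n):
--     # all positive divisors of n (n >= 1), found in O(sqrt(n)) steps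
--     ds = []
--     i = 1
--     while i * i <= n:
--         if n % i == 0:
--             ds.append(i)
--             ds.append(n // i)
--         i += 1
--     return ds
--
--
-- def check_mod(x, y):
--     lo, hi = min(x, y), max(x, y)
--     if hi % lo == 0:
--         return 0
--     # raise the smaller number to the nearest divisor of the larger one,
--     # or raise the larger number to its next multiple of the smaller one
--     to_divisor = min(d for d in divisors(hi) if d >= lo) - lo
--     to_multiple = -hi % lo
--     return min(to_divisor, to_multiple)
-- ===== Notes on version B (the rewrite author's own statement) =====
-- stated objective: faster
-- what changed: Replaces A's two unit-step while-loops (each walking up to max(x,y) steps re-testing divisibility) with closed forms: next-multiple distance via one modulo and nearest divisor >= the smaller number via O(sqrt(hi)) divisor enumeration; Pre_ restricts to the problem's natural domain of positive integers (A raises ZeroDivisionError at 0, and its values on negative inputs are accidents of unit-stepping through negative values, where either behaviour is defensible).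
-- outside the precondition, e.g. on check_mod(-5, 7): A returns 3, B returns -2; on check_mod(0, 5): A raises ZeroDivisionError, B raises ZeroDivisionError; on check_mod(-3, -7): A returns 3, B raises ValueError
import Mathlib
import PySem

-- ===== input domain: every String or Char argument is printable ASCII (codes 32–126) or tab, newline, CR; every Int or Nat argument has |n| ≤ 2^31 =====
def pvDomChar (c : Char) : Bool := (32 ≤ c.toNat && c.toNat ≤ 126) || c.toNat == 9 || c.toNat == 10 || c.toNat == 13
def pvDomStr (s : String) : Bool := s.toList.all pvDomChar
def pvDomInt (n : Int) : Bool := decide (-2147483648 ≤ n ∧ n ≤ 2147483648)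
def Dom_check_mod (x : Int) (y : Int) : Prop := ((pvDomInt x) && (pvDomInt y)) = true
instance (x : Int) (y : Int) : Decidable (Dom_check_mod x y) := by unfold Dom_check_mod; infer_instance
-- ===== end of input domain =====

-- B replaces A's two unit-step search loops by closed forms on positive inputs
-- (one modulo for the next multiple, an O(√hi) divisor enumeration for the
-- nearest divisor) — objective: faster (asymptotic).

-- ===== PORT A =====
-- the loop condition 'max(z, b) % min(z, b) != 0'
def pvCond (z b : Int) : Bool := PySem.Int.mod (max z b) (min z b) != 0

-- fuel making the while-loop total; the equivalence proof shows the loop always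
-- stops within the fuel on the admitted inputs
def pvFuel (x y : Int) : Nat := x.natAbs + y.natAbs + 1

-- 'while max(z, b) % min(z, b) != 0: if i == 0: z += 1; f += 1 elif i == 1: b += 1; f += 1'
def pvLoopA (i z b f : Int) : Nat → Int
  | 0 => f
  | fuel + 1 =>
    if pvCond z b then
      if i == 0 then pvLoopA i (z + 1) b (f + 1) fuel
      else if i == 1 then pvLoopA i z (b + 1) (f + 1) fuel
      else pvLoopA i z b f fuel
    else f

def check_mod (x : Int) (y : Int) : Int :=
  if PySem.Int.mod (max x y) (min y x) == 0 then 0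
  else
    -- c = float('inf') ported as 'none'; 'for i in range(2): … if f < c: c = f'
    let c : Option Int := (PySem.List.pyRange 0 2 1).foldl
      (fun (c : Option Int) i =>
        let f := pvLoopA i x y 0 (pvFuel x y)
        match c with
        | none => some f            -- f < inf
        | some cv => if f < cv then some f else c) none
    match c with
    | some v => v
    | none => 0                     -- unreachable: c is set on the first iteration

-- ===== PORT B =====
-- 'ds = []; i = 1; while i*i <= n: if n % i == 0: ds.append(i); ds.append(n//i); i += 1'
def pvDivLoop (n : Int) (ds : List Int) (i : Int) : Nat → List Int
  | 0 => ds
  | fuel + 1 =>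
    if i * i ≤ n then
      pvDivLoop n
        (if PySem.Int.mod n i == 0 then ds ++ [i, PySem.Int.floordiv n i] else ds)
        (i + 1) fuel
    else ds

def pvDivisors (n : Int) : List Int := pvDivLoop n [] 1 (n.natAbs + 1)

-- 'min(d for d in divisors(hi) if d >= lo) - lo' (nonempty under Pre_: hi is such a d)
def pvToDiv (lo hi : Int) : Int :=
  (match PySem.List.min? ((pvDivisors hi).filter (fun d => decide (lo ≤ d))) (fun d => d) with
   | some m => m
   | none => 0) - lo

def check_mod_alt (x : Int) (y : Int) : Int :=
  let lo := min x y
  let hi := max x y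
  if PySem.Int.mod hi lo == 0 then 0
  else min (pvToDiv lo hi) (PySem.Int.mod (-hi) lo)

-- ===== PRECONDITION & SPEC =====
-- Pre_ restricts to the problem's natural domain of positive integers: A raises
-- ZeroDivisionError when x = 0 or y = 0, and its values on negative inputs are
-- accidents of unit-stepping through negative values (a corner the task never
-- specifies), which B's divisor arithmetic does not reproduce.
def Pre_check_mod (x : Int) (y : Int) : Prop := 0 < x ∧ 0 < y
instance (x : Int) (y : Int) : Decidable (Pre_check_mod x y) := by unfold Pre_check_mod; infer_instance
def pvWitness_check_mod : Int × Int := (3, 7)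

def Spec_check_mod (x : Int) (y : Int) (out : Int) : Prop := out = check_mod_alt x y
instance (x : Int) (y : Int) (out : Int) : Decidable (Spec_check_mod x y out) := by unfold Spec_check_mod; infer_instance

-- ===== CLAIM (what is proved, stated in full; the proofs are below) =====
def Claim_equal_check_mod : Prop := ∀ (x : Int) (y : Int), Dom_check_mod x y → Pre_check_mod x y → Spec_check_mod x y (check_mod x y)

-- ===== LEMMAS AND PROOFS =====

-- 't is the number of iterations of A's i-th loop': the condition holds strictly
-- before t and fails at t
def pvStops (x y t : Int) : Prop :=
  0 ≤ t ∧ pvCond (x + t) y = false ∧ ∀ s, 0 ≤ s → s < t → pvCond (x + s) y = true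

lemma pvCond_false_iff (z b : Int) : pvCond z b = false ↔ min z b ∣ max z b := by
  simp [pvCond, PySem.Int.mod_eq_zero_iff_dvd]

lemma pvCond_true_iff (z b : Int) : pvCond z b = true ↔ ¬ (min z b ∣ max z b) := by
  simp [pvCond, PySem.Int.mod_eq_zero_iff_dvd]

lemma pvCond_symm (z b : Int) : pvCond z b = pvCond b z := by
  simp [pvCond, max_comm, min_comm]

lemma pvLoopA_one_eq (z b f : Int) (fuel : Nat) :
    pvLoopA 1 z b f fuel = pvLoopA 0 b z f fuel := by
  induction fuel generalizing z b f with
  | zero => rfl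
  | succ n ih =>
    simp only [pvLoopA, pvCond_symm z b]
    by_cases hc : pvCond b z
    · simp [hc, ih]
    · simp [hc]

lemma pvLoopA_run (y : Int) :
    ∀ (fuel : Nat) (z f t : Int), pvStops z y t → t < (fuel : Int) →
      pvLoopA 0 z y f fuel = f + t := by
  intro fuel
  induction fuel with
  | zero =>
    intro z f t h hf
    have := h.1
    omega
  | succ n ih =>
    intro z f t h hf
    obtain ⟨ht0, hstop, hrun⟩ := h
    by_cases h0 : t = 0
    · subst h0
      have hc : pvCond z y = false := by simpa using hstop
      simp [pvLoopA, hc]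
    · have hc : pvCond z y = true := by
        have := hrun 0 le_rfl (by omega)
        simpa using this
      have hrec : pvLoopA 0 z y f (n + 1) = pvLoopA 0 (z + 1) y (f + 1) n := by
        simp [pvLoopA, hc]
      rw [hrec, ih (z + 1) (f + 1) (t - 1)
        ⟨by omega,
         by rw [show z + 1 + (t - 1) = z + t by ring]; exact hstop,
         fun s hs0 hst => by
           have := hrun (s + 1) (by omega) (by omega)
           rwa [show z + (s + 1) = z + 1 + s by ring] at this⟩
        (by push_cast at hf ⊢; omega)]
      ring

lemma mem_pvDivLoop (n d : Int) :
    ∀ (fuel : Nat) (i : Int) (ds : List Int), 0 < i → n < i + (fuel : Int) →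
      (d ∈ pvDivLoop n ds i fuel ↔
        d ∈ ds ∨ ∃ k : Int, i ≤ k ∧ k * k ≤ n ∧ k ∣ n ∧ (d = k ∨ d = PySem.Int.floordiv n k)) := by
  intro fuel
  induction fuel with
  | zero =>
    intro i ds hi hn
    simp only [pvDivLoop]
    constructor
    · exact Or.inl
    · rintro (h | ⟨k, hik, hkk, -, -⟩)
      · exact h
      · exfalso
        have h1 : i ≤ i * i := le_mul_of_one_le_left (by omega) (by omega)
        have h2 : i * i ≤ k * k := mul_le_mul hik hik (by omega) (by omega)
        push_cast at hn
        omega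
  | succ m ih =>
    intro i ds hi hn
    simp only [pvDivLoop]
    by_cases hii : i * i ≤ n
    · simp only [if_pos hii]
      rw [ih (i + 1) _ (by omega) (by push_cast at hn ⊢; omega)]
      by_cases hmod : PySem.Int.mod n i = 0
      · have hdvd : i ∣ n := (PySem.Int.mod_eq_zero_iff_dvd n i).mp hmod
        simp only [hmod]
        constructor
        · rintro (h | ⟨k, hk1, hk2, hk3, hk4⟩)
          · simp only [beq_self_eq_true, if_true, List.mem_append, List.mem_cons,
              List.not_mem_nil, or_false] at h
            rcases h with h | h | h
            · exact Or.inl h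
            · exact Or.inr ⟨i, le_rfl, hii, hdvd, Or.inl h⟩
            · exact Or.inr ⟨i, le_rfl, hii, hdvd, Or.inr h⟩
          · exact Or.inr ⟨k, by omega, hk2, hk3, hk4⟩
        · rintro (h | ⟨k, hk1, hk2, hk3, hk4⟩)
          · exact Or.inl (by simp [h])
          · by_cases hki : k = i
            · subst hki
              rcases hk4 with h | h <;> exact Or.inl (by simp [h])
            · exact Or.inr ⟨k, by omega, hk2, hk3, hk4⟩
      · have hndvd : ¬ i ∣ n := fun h => hmod ((PySem.Int.mod_eq_zero_iff_dvd n i).mpr h)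
        have hbeq : (PySem.Int.mod n i == 0) = false := by simpa using hmod
        simp only [hbeq]
        constructor
        · rintro (h | ⟨k, hk1, hk2, hk3, hk4⟩)
          · exact Or.inl h
          · exact Or.inr ⟨k, by omega, hk2, hk3, hk4⟩
        · rintro (h | ⟨k, hk1, hk2, hk3, hk4⟩)
          · exact Or.inl h
          · by_cases hki : k = i
            · subst hki; exact absurd hk3 hndvd
            · exact Or.inr ⟨k, by omega, hk2, hk3, hk4⟩
    · simp only [if_neg hii]
      constructor
      · exact Or.inl
      · rintro (h | ⟨k, hik, hkk, -, -⟩)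
        · exact h
        · exfalso
          have h2 : i * i ≤ k * k := mul_le_mul hik hik (by omega) (by omega)
          omega

lemma floordiv_mul_of_dvd (n k : Int) (h : k ∣ n) : PySem.Int.floordiv n k * k = n := by
  have hm : PySem.Int.mod n k = 0 := (PySem.Int.mod_eq_zero_iff_dvd n k).mpr h
  have := PySem.Int.floordiv_mul_add_mod n k
  omega

lemma mem_pvDivisors (n : Int) (hn : 0 < n) (d : Int) :
    d ∈ pvDivisors n ↔ 0 < d ∧ d ∣ n := by
  unfold pvDivisors
  rw [mem_pvDivLoop n d (n.natAbs + 1) 1 [] one_pos (by omega)]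
  simp only [List.not_mem_nil, false_or]
  constructor
  · rintro ⟨k, hk1, hkk, hkdvd, hd | hd⟩
    · subst hd; exact ⟨by omega, hkdvd⟩
    · subst hd
      have hmul : PySem.Int.floordiv n k * k = n := floordiv_mul_of_dvd n k hkdvd
      have hkn : k ≤ n := by
        have : k ≤ k * k := le_mul_of_one_le_left (by omega) hk1
        omega
      have hpos : 1 ≤ PySem.Int.floordiv n k :=
        (PySem.Int.le_floordiv_iff_mul_le (by omega)).mpr (by omega)
      exact ⟨by omega, ⟨k, hmul.symm⟩⟩
  · rintro ⟨hd0, hdvd⟩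
    have hdn : d ≤ n := Int.le_of_dvd hn hdvd
    set e := PySem.Int.floordiv n d with he
    have hmul : e * d = n := floordiv_mul_of_dvd n d hdvd
    have he1 : 1 ≤ e := (PySem.Int.le_floordiv_iff_mul_le (by omega)).mpr (by omega)
    by_cases hdd : d * d ≤ n
    · exact ⟨d, by omega, hdd, hdvd, Or.inl rfl⟩
    · have hed : e < d := by
        by_contra hle
        rw [not_lt] at hle
        have : d * d ≤ e * d := mul_le_mul_of_nonneg_right hle (by omega)
        omega
      have hee : e * e ≤ n := by
        calc e * e ≤ e * d := mul_le_mul_of_nonneg_left (by omega) (by omega)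
        _ = n := hmul
      have hedvd : e ∣ n := ⟨d, hmul.symm⟩
      have hd_eq : d = PySem.Int.floordiv n e := by
        have h2 : PySem.Int.floordiv n e * e = n := floordiv_mul_of_dvd n e hedvd
        have : PySem.Int.floordiv n e * e = d * e := by rw [h2, ← hmul]; ring
        exact (mul_right_cancel₀ (by omega) this).symm
      exact ⟨e, he1, hee, hedvd, Or.inr hd_eq⟩

-- incrementing the larger number: the loop runs exactly (-x) mod y steps
lemma pvStops_case_ge (x y : Int) (hy : 0 < y) (hxy : y ≤ x) :
    pvStops x y (PySem.Int.mod (-x) y) ∧ PySem.Int.mod (-x) y < (pvFuel x y : Int) := by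
  rw [PySem.Int.mod_eq_emod_of_pos hy]
  set t := (-x) % y with ht
  have ht0 : 0 ≤ t := Int.emod_nonneg _ (by omega)
  have htm : t < y := Int.emod_lt_of_pos _ hy
  have hdt : y ∣ x + t := by
    refine ⟨-((-x) / y), ?_⟩
    rw [ht, Int.emod_def]
    ring
  refine ⟨⟨ht0, ?_, ?_⟩, ?_⟩
  · rw [pvCond_false_iff, min_eq_right (by omega), max_eq_left (by omega)]
    exact hdt
  · intro s hs0 hst
    rw [pvCond_true_iff, min_eq_right (by omega), max_eq_left (by omega)]
    intro hdvd
    have : y ∣ (x + t) - (x + s) := dvd_sub hdt hdvd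
    have hle := Int.le_of_dvd (by omega) this
    omega
  · unfold pvFuel; omega

-- incrementing the smaller number: the loop stops at the nearest divisor of y
lemma pvStops_case_pos (x y : Int) (h0 : 0 < x) (hxy : x < y) :
    pvStops x y (pvToDiv x y) ∧ pvToDiv x y < (pvFuel x y : Int) := by
  have hyL : y ∈ (pvDivisors y).filter (fun d => decide (x ≤ d)) := by
    rw [List.mem_filter]
    exact ⟨(mem_pvDivisors y (by omega) y).mpr ⟨by omega, dvd_refl y⟩, by simp; omega⟩
  obtain ⟨m, hm⟩ : ∃ m, PySem.List.min? ((pvDivisors y).filter (fun d => decide (x ≤ d))) (fun d => d) = some m := by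
    cases hmin : PySem.List.min? ((pvDivisors y).filter (fun d => decide (x ≤ d))) (fun d => d) with
    | none =>
      rw [PySem.List.min?_eq_none_iff] at hmin
      rw [hmin] at hyL
      cases hyL
    | some m => exact ⟨m, rfl⟩
  have hmem := PySem.List.min?_mem hm
  rw [List.mem_filter] at hmem
  obtain ⟨hmdiv, hxm'⟩ := hmem
  have hxm : x ≤ m := by simpa using hxm'
  obtain ⟨hm0, hmdvd⟩ := (mem_pvDivisors y (by omega) m).mp hmdiv
  have hmy : m ≤ y := Int.le_of_dvd (by omega) hmdvd
  have hmin := PySem.List.min?_isMin hm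
  have hsv : pvToDiv x y = m - x := by
    simp only [pvToDiv, hm]
  rw [hsv]
  refine ⟨⟨by omega, ?_, ?_⟩, ?_⟩
  · rw [show x + (m - x) = m by ring, pvCond_false_iff,
      min_eq_left hmy, max_eq_right hmy]
    exact hmdvd
  · intro s hs0 hst
    rw [pvCond_true_iff, min_eq_left (by omega), max_eq_right (by omega)]
    intro hdvd
    have hzL : x + s ∈ (pvDivisors y).filter (fun d => decide (x ≤ d)) := by
      rw [List.mem_filter]
      exact ⟨(mem_pvDivisors y (by omega) _).mpr ⟨by omega, hdvd⟩, by simp; omega⟩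
    have := hmin _ hzL
    simp only at this
    omega
  · unfold pvFuel; omega

lemma pvFuel_symm (x y : Int) : pvFuel y x = pvFuel x y := by
  unfold pvFuel; omega

-- ===== VERDICT (by name: the statement is the Claim_ definition above) =====
theorem check_mod_spec : Claim_equal_check_mod := by
  intro x y _hdom hpre
  obtain ⟨hx, hy⟩ := hpre
  unfold Spec_check_mod check_mod check_mod_alt
  simp only [min_comm y x]
  by_cases hg : PySem.Int.mod (max x y) (min x y) = 0
  · simp [hg]
  · have hgb : (PySem.Int.mod (max x y) (min x y) == 0) = false := by simpa using hg
    simp only [hgb, if_false, Bool.false_eq_true]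
    have hrange : PySem.List.pyRange 0 2 1 = [0, 1] := by decide
    rw [hrange]
    simp only [List.foldl]
    have hne : x ≠ y := by
      intro h
      subst h
      apply hg
      simp [max_self, min_self, (PySem.Int.mod_eq_zero_iff_dvd x x).mpr (dvd_refl x)]
    rcases lt_or_gt_of_ne hne with hlt | hgt
    · -- x < y : loop 0 stops at pvToDiv x y, loop 1 at mod (-y) x
      obtain ⟨hs0, hb0⟩ := pvStops_case_pos x y hx hlt
      obtain ⟨hs1, hb1⟩ := pvStops_case_ge y x hx (by omega)
      have hf0 : pvLoopA 0 x y 0 (pvFuel x y) = pvToDiv x y := by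
        have := pvLoopA_run y (pvFuel x y) x 0 (pvToDiv x y) hs0 hb0
        omega
      have hf1 : pvLoopA 1 x y 0 (pvFuel x y) = PySem.Int.mod (-y) x := by
        rw [pvLoopA_one_eq]
        have := pvLoopA_run x (pvFuel x y) y 0 (PySem.Int.mod (-y) x) hs1
          (by rw [← pvFuel_symm]; exact hb1)
        omega
      rw [hf0, hf1, min_eq_left (le_of_lt hlt), max_eq_right (le_of_lt hlt)]
      rcases le_or_gt (pvToDiv x y) (PySem.Int.mod (-y) x) with h | h
      · rw [if_neg (by omega), min_eq_left h]
      · rw [if_pos h, min_eq_right (by omega)]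
    · -- y < x : loop 0 stops at mod (-x) y, loop 1 at pvToDiv y x
      obtain ⟨hs0, hb0⟩ := pvStops_case_ge x y hy (by omega)
      obtain ⟨hs1, hb1⟩ := pvStops_case_pos y x hy hgt
      have hf0 : pvLoopA 0 x y 0 (pvFuel x y) = PySem.Int.mod (-x) y := by
        have := pvLoopA_run y (pvFuel x y) x 0 (PySem.Int.mod (-x) y) hs0 hb0
        omega
      have hf1 : pvLoopA 1 x y 0 (pvFuel x y) = pvToDiv y x := by
        rw [pvLoopA_one_eq]
        have := pvLoopA_run x (pvFuel x y) y 0 (pvToDiv y x) hs1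
          (by rw [← pvFuel_symm]; exact hb1)
        omega
      rw [hf0, hf1, min_eq_right (le_of_lt hgt), max_eq_left (le_of_lt hgt)]
      rcases le_or_gt (PySem.Int.mod (-x) y) (pvToDiv y x) with h | h
      · rw [if_neg (by omega)]; simp; exact h
      · rw [if_pos h]; simp; exact le_of_lt h
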